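-- pv_equiv track=rewrite | github.com/davidbernson/aoc2024 | 5/part1.py | validateInstruction
-- ===== SOURCE A (Python) =====
-- def buildRuleSubset(instruction, rules):
--     return [rule for rule in rules if rule[0] in list(instruction) and rule[1] in list(instruction)]
--
-- def validateRule(instruction, rule):
--     instruction = list(instruction)
--     a = rule[0]
--     b = rule[1]
--
--     if instruction.index(a) < instruction.index(b):
--         return True
--     else:
--         return False
--
-- def validateInstruction(instruction, rules):
--     ruleSubset = buildRuleSubset(instruction, rules)
--
--     for rule in ruleSubset:
--         if validateRule(instruction, rule):
--             continue
--         else: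
--             return False
--     return True
-- ===== SOURCE B (Python) =====
-- def validateInstruction(instruction, rules):
--     ruleset = {(r[0], r[1]) for r in rules}
--     seen = set()
--     for x in list(instruction):
--         if x in seen:
--             continue
--         if (x, x) in ruleset:
--             return False
--         for w in seen:
--             if (x, w) in ruleset:
--                 return False
--         seen.add(x)
--     return True
-- ===== Notes on version B (the rewrite author's own statement) =====
-- stated objective: alternative
-- what changed: Instead of filtering the rules and comparing two list.index scans per rule, B makes one forward pass over the instruction maintaining a set of already-seen first occurrences and rejects an element whose rule says it must precede an element already seen (or itself).
import Mathlib
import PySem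

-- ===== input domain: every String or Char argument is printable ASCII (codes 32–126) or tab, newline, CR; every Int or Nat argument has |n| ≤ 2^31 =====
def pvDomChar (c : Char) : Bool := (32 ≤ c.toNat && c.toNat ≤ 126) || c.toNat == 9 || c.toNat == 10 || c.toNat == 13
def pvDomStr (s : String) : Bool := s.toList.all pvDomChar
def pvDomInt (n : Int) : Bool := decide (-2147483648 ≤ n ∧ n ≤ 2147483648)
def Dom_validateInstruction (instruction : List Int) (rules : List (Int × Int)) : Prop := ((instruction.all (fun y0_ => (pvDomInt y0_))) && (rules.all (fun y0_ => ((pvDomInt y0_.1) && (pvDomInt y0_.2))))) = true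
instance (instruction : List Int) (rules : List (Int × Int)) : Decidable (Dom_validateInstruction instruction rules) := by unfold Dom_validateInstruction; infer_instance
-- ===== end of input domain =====

-- B replaces A's rule-filtering pass + two linear list.index scans per rule by one forward pass
-- over the instruction that maintains the set of first occurrences seen so far and rejects an
-- element that a rule requires to precede an already-seen element (or itself).
-- (objective: alternative decomposition; return value only, neither program mutates its arguments.)

-- ===== PORT A =====
def buildRuleSubset (instruction : List Int) (rules : List (Int × Int)) : List (Int × Int) :=
  rules.filter (fun rule => instruction.contains rule.1 && instruction.contains rule.2)

-- instruction.index(v) raises ValueError when v is absent; A only calls this on members of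
-- instruction (buildRuleSubset guarantees it), so the `none` branches are unreachable.
def validateRule (instruction : List Int) (rule : Int × Int) : Bool :=
  match PySem.List.index? instruction rule.1, PySem.List.index? instruction rule.2 with
  | some ia, some ib => decide (ia < ib)
  | _, _ => false

def goA (instruction : List Int) : List (Int × Int) → Bool
  | [] => true
  | rule :: rest => if validateRule instruction rule then goA instruction rest else false

def validateInstruction (instruction : List Int) (rules : List (Int × Int)) : Bool :=
  goA instruction (buildRuleSubset instruction rules)

-- ===== PORT B =====
-- 'for w in seen: if (x, w) in ruleset: return False' — the Bool returned does not depend on the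
-- set's iteration order (it is an existence test), so List.any over the Set's elements is exact.
def goB (rs : PySem.Set (Int × Int)) (seen : PySem.Set Int) : List Int → Bool
  | [] => true
  | x :: rest =>
    if PySem.Set.contains seen x then goB rs seen rest
    else if PySem.Set.contains rs (x, x) then false
    else if seen.any (fun w => PySem.Set.contains rs (x, w)) then false
    else goB rs (PySem.Set.add seen x) rest

def validateInstruction_alt (instruction : List Int) (rules : List (Int × Int)) : Bool :=
  goB (PySem.Set.ofList (rules.map (fun r => (r.1, r.2)))) PySem.Set.empty instruction

-- ===== PRECONDITION & SPEC =====
def Spec_validateInstruction (instruction : List Int) (rules : List (Int × Int)) (out : Bool) : Prop := out = validateInstruction_alt instruction rules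
instance (instruction : List Int) (rules : List (Int × Int)) (out : Bool) : Decidable (Spec_validateInstruction instruction rules out) := by unfold Spec_validateInstruction; infer_instance

-- ===== CLAIM (what is proved, stated in full; the proofs are below) =====
def Claim_equal_validateInstruction : Prop := ∀ (instruction : List Int) (rules : List (Int × Int)), Dom_validateInstruction instruction rules → Spec_validateInstruction instruction rules (validateInstruction instruction rules)

-- ===== LEMMAS AND PROOFS =====

theorem goA_eq_all (instruction : List Int) (l : List (Int × Int)) :
    goA instruction l = l.all (validateRule instruction) := by
  induction l with
  | nil => rfl
  | cons r rest ih => simp [goA, ih]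

theorem index?_of_mem (l : List Int) (a : Int) (h : a ∈ l) :
    PySem.List.index? l a = some (l.idxOf a) := by
  rw [PySem.List.index?_eq_idxOf?]
  induction l with
  | nil => cases h
  | cons x xs ih =>
    by_cases hx : x = a
    · subst hx; simp [List.idxOf?_cons]
    · have hne : (x == a) = false := beq_false_of_ne hx
      rcases List.mem_cons.mp h with h1 | h2
      · exact absurd h1.symm hx
      · simp [List.idxOf?_cons, List.idxOf_cons, hne, ih h2]

theorem validateRule_eq (instruction : List Int) (a b : Int)
    (ha : a ∈ instruction) (hb : b ∈ instruction) :
    validateRule instruction (a, b) = decide (instruction.idxOf a < instruction.idxOf b) := by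
  simp only [validateRule, index?_of_mem _ _ ha, index?_of_mem _ _ hb]

theorem a_iff (instruction : List Int) (rules : List (Int × Int)) :
    validateInstruction instruction rules = true ↔
      ∀ a b, (a, b) ∈ rules → a ∈ instruction → b ∈ instruction →
        instruction.idxOf a < instruction.idxOf b := by
  unfold validateInstruction buildRuleSubset
  rw [goA_eq_all]
  constructor
  · intro h a b hr ha hb
    have hmem : (a, b) ∈ rules.filter
        (fun rule => instruction.contains rule.1 && instruction.contains rule.2) := by
      simp [List.mem_filter, hr, ha, hb]
    have := List.all_eq_true.mp h _ hmem
    rw [validateRule_eq _ _ _ ha hb] at this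
    exact of_decide_eq_true this
  · intro h
    apply List.all_eq_true.mpr
    rintro ⟨a, b⟩ hmem
    rcases List.mem_filter.mp hmem with ⟨hr, hcond⟩
    simp only [Bool.and_eq_true, List.contains_iff_mem] at hcond
    rw [validateRule_eq _ _ _ hcond.1 hcond.2]
    exact decide_eq_true (h a b hr hcond.1 hcond.2)

-- The "violation" a B run starting from state `seen = S` on suffix `l` will detect:
-- some rule (a, b) whose left side a is first processed during the run (a ∈ l, a ∉ S)
-- while b is already seen at that moment (b = a, b ∈ S, or b occurs in l before a does).
def BadB (rs : List (Int × Int)) (S : List Int) (l : List Int) : Prop :=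
  ∃ a b, (a, b) ∈ rs ∧ a ∈ l ∧ a ∉ S ∧ (b = a ∨ b ∈ S ∨ b ∈ l.take (l.idxOf a))

theorem mem_take_iff (b : Int) (l : List Int) : ∀ n, b ∈ l.take n ↔ b ∈ l ∧ l.idxOf b < n := by
  induction l with
  | nil => intro n; simp
  | cons x xs ih =>
    intro n
    cases n with
    | zero => simp
    | succ m =>
      by_cases hx : b = x
      · subst hx; simp [List.idxOf_cons_self]
      · simp [List.take_succ_cons, List.mem_cons, hx, ih m,
          List.idxOf_cons, beq_false_of_ne (Ne.symm hx)]

theorem idxOf_cons_ne (x a : Int) (l : List Int) (h : a ≠ x) :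
    (x :: l).idxOf a = l.idxOf a + 1 := by
  simp [List.idxOf_cons, beq_false_of_ne (Ne.symm h)]

theorem goB_true_iff (rs : List (Int × Int)) (l : List Int) :
    ∀ S : PySem.Set Int, goB rs S l = true ↔ ¬ BadB rs S l := by
  induction l with
  | nil =>
    intro S
    simp only [goB, BadB, List.not_mem_nil, true_iff]
    rintro ⟨a, b, _, h, _⟩; exact h.elim
  | cons x rest ih =>
    intro S
    by_cases hx : x ∈ S
    · have hxc : PySem.Set.contains S x = true := (PySem.Set.contains_iff _ _).mpr hx
      rw [goB, if_pos hxc, ih S]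
      constructor
      · rintro h ⟨a, b, hr, ha, haS, hcond⟩
        have hax : a ≠ x := fun he => haS (he ▸ hx)
        have ha' : a ∈ rest := by rcases List.mem_cons.mp ha with h1 | h1; exact absurd h1 hax; exact h1
        apply h
        refine ⟨a, b, hr, ha', haS, ?_⟩
        rcases hcond with h1 | h1 | h1
        · exact Or.inl h1
        · exact Or.inr (Or.inl h1)
        · rw [idxOf_cons_ne x a rest hax, List.take_succ_cons] at h1
          rcases List.mem_cons.mp h1 with h2 | h2
          · exact Or.inr (Or.inl (h2 ▸ hx))
          · exact Or.inr (Or.inr h2)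
      · rintro h ⟨a, b, hr, ha, haS, hcond⟩
        have hax : a ≠ x := fun he => haS (he ▸ hx)
        apply h
        refine ⟨a, b, hr, List.mem_cons_of_mem _ ha, haS, ?_⟩
        rcases hcond with h1 | h1 | h1
        · exact Or.inl h1
        · exact Or.inr (Or.inl h1)
        · rw [idxOf_cons_ne x a rest hax, List.take_succ_cons]
          exact Or.inr (Or.inr (List.mem_cons_of_mem _ h1))
    · have hxc : PySem.Set.contains S x = false := by
        rw [Bool.eq_false_iff]
        intro h
        exact hx ((PySem.Set.contains_iff _ _).mp h)
      rw [goB, if_neg (by rw [hxc]; exact Bool.false_ne_true)]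
      by_cases hself : (x, x) ∈ rs
      · rw [if_pos ((PySem.Set.contains_iff _ _).mpr hself)]
        simp only [Bool.false_eq_true, false_iff, not_not]
        exact ⟨x, x, hself, List.mem_cons_self, hx, Or.inl rfl⟩
      · have hselfc : PySem.Set.contains rs (x, x) = false := by
          rw [Bool.eq_false_iff]
          intro h
          exact hself ((PySem.Set.contains_iff _ _).mp h)
        rw [if_neg (by rw [hselfc]; exact Bool.false_ne_true)]
        by_cases hany : ∃ w ∈ S, (x, w) ∈ rs
        · rcases hany with ⟨w, hwS, hwr⟩
          have hanyt : (S.any fun w => PySem.Set.contains rs (x, w)) = true :=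
            List.any_eq_true.mpr ⟨w, hwS, (PySem.Set.contains_iff rs (x, w)).mpr hwr⟩
          rw [if_pos hanyt]
          simp only [Bool.false_eq_true, false_iff, not_not]
          exact ⟨x, w, hwr, List.mem_cons_self, hx, Or.inr (Or.inl hwS)⟩
        · have hanyc : (S.any fun w => PySem.Set.contains rs (x, w)) = false := by
            rw [Bool.eq_false_iff]
            intro h
            rcases List.any_eq_true.mp h with ⟨w, hwS, hwc⟩
            exact hany ⟨w, hwS, (PySem.Set.contains_iff _ _).mp hwc⟩
          rw [if_neg (by rw [hanyc]; exact Bool.false_ne_true)]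
          rw [ih (PySem.Set.add S x)]
          constructor
          · rintro h ⟨a, b, hr, ha, haS, hcond⟩
            by_cases hax : a = x
            · subst hax
              rcases hcond with h1 | h1 | h1
              · exact hself (h1 ▸ hr)
              · exact hany ⟨b, h1, hr⟩
              · rw [List.idxOf_cons_self, List.take_zero] at h1; exact (List.not_mem_nil).elim h1
            · have ha' : a ∈ rest := by
                rcases List.mem_cons.mp ha with h1 | h1; exact absurd h1 hax; exact h1
              have haS' : a ∉ PySem.Set.add S x := by
                rw [PySem.Set.mem_add]; rintro (h1 | h1); exact haS h1; exact hax h1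
              apply h
              refine ⟨a, b, hr, ha', haS', ?_⟩
              rcases hcond with h1 | h1 | h1
              · exact Or.inl h1
              · exact Or.inr (Or.inl ((PySem.Set.mem_add _ _ _).mpr (Or.inl h1)))
              · rw [idxOf_cons_ne x a rest hax, List.take_succ_cons] at h1
                rcases List.mem_cons.mp h1 with h2 | h2
                · exact Or.inr (Or.inl ((PySem.Set.mem_add _ _ _).mpr (Or.inr h2)))
                · exact Or.inr (Or.inr h2)
          · rintro h ⟨a, b, hr, ha, haS, hcond⟩
            have haS0 : a ∉ S := fun h1 => haS ((PySem.Set.mem_add _ _ _).mpr (Or.inl h1))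
            have hax : a ≠ x := fun h1 => haS ((PySem.Set.mem_add _ _ _).mpr (Or.inr h1))
            apply h
            refine ⟨a, b, hr, List.mem_cons_of_mem _ ha, haS0, ?_⟩
            rcases hcond with h1 | h1 | h1
            · exact Or.inl h1
            · rcases (PySem.Set.mem_add _ _ _).mp h1 with h2 | h2
              · exact Or.inr (Or.inl h2)
              · rw [idxOf_cons_ne x a rest hax, List.take_succ_cons, h2]
                exact Or.inr (Or.inr List.mem_cons_self)
            · rw [idxOf_cons_ne x a rest hax, List.take_succ_cons]
              exact Or.inr (Or.inr (List.mem_cons_of_mem _ h1))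

theorem idxOf_inj (l : List Int) (a b : Int) (ha : a ∈ l) (hb : b ∈ l)
    (h : l.idxOf a = l.idxOf b) : a = b := by
  have h1 : l[l.idxOf a]'(List.idxOf_lt_length_of_mem ha) = a := List.getElem_idxOf _
  have h2 : l[l.idxOf b]'(List.idxOf_lt_length_of_mem hb) = b := List.getElem_idxOf _
  rw [← h1, ← h2]
  simp [h]

theorem alt_iff (instruction : List Int) (rules : List (Int × Int)) :
    validateInstruction_alt instruction rules = true ↔
      ∀ a b, (a, b) ∈ rules → a ∈ instruction → b ∈ instruction →
        instruction.idxOf a < instruction.idxOf b := by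
  unfold validateInstruction_alt
  have hrw : ∀ p : Int × Int, p ∈ PySem.Set.ofList (rules.map (fun r => (r.1, r.2))) ↔ p ∈ rules := by
    intro p
    rw [PySem.Set.mem_ofList]
    constructor
    · intro h; rcases List.mem_map.mp h with ⟨r, hr, he⟩; exact he ▸ hr
    · intro h; exact List.mem_map.mpr ⟨p, h, rfl⟩
  rw [goB_true_iff]
  constructor
  · intro h a b hr ha hb
    by_contra hlt
    rw [not_lt] at hlt
    apply h
    refine ⟨a, b, hrw _ |>.mpr hr, ha, by simp [PySem.Set.empty], ?_⟩
    rcases lt_or_eq_of_le hlt with h1 | h1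
    · exact Or.inr (Or.inr ((mem_take_iff b instruction _).mpr ⟨hb, h1⟩))
    · exact Or.inl (idxOf_inj _ _ _ hb ha h1)
  · rintro h ⟨a, b, hr, ha, _, hcond⟩
    have hr' : (a, b) ∈ rules := (hrw _).mp hr
    rcases hcond with h1 | h1 | h1
    · subst h1
      exact lt_irrefl _ (h _ _ hr' ha ha)
    · simp [PySem.Set.empty] at h1
    · rcases (mem_take_iff b instruction _).mp h1 with ⟨hb, hlt⟩
      exact absurd (h a b hr' ha hb) (by omega)

-- ===== VERDICT (by name: the statement is the Claim_ definition above) =====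
theorem validateInstruction_spec : Claim_equal_validateInstruction := by
  intro instruction rules _
  unfold Spec_validateInstruction
  have h := (a_iff instruction rules).trans (alt_iff instruction rules).symm
  exact Bool.eq_iff_iff.mpr h
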